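-- pv_equiv track=rewrite | github.com/LaryPop26/UBB-CS | FirstSemester/Programming fundamentals/Labs/lab3.1/lab 3.py | maxlen2
-- ===== SOURCE A (Python) =====
-- def is_prime(a):    # 4,7
--     if a == 2 or a == 3:
--         return True
--     if a < 2 or a % 2 == 0 or a % 3 == 0:
--         return False
--     i = 3
--     while i * i <= a:
--         if a % i == 0:
--             return False
--         i += 2
--     return True
--
-- def verify_prop2(a, command):
--     if command == "4":    # 4
--         return is_prime(a)
--     if command == "8":    # 8
--         return 0 <= a <= 10
--
-- def maxlen2(lst, command):
--     length = 0
--     lenmax = 0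
--     ind = -1
--
--     for i in range(len(lst)):
--         if verify_prop2(lst[i], command):
--             length += 1
--         else:
--             length = 0
--
--         if length >= lenmax:
--             lenmax = length
--             ind = i+1
--
--     if lenmax == 0:
--         return [lst[0]]
--
--     return lst[ind - lenmax:ind]
-- ===== SOURCE B (Python) =====
-- def is_prime(a):    # 4,7
--     if a == 2 or a == 3:
--         return True
--     if a < 2 or a % 2 == 0 or a % 3 == 0:
--         return False
--     i = 3
--     while i * i <= a:
--         if a % i == 0:
--             return False
--         i += 2
--     return True
--
-- def verify_prop2(a, command):
--     if command == "4":    # 4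
--         return is_prime(a)
--     if command == "8":    # 8
--         return 0 <= a <= 10
--
-- def maxlen2(lst, command):
--     mask = [bool(verify_prop2(x, command)) for x in lst]
--     # collect the maximal runs of consecutive True values as (start, length)
--     runs = []
--     cur = None
--     for i, m in enumerate(mask):
--         if m:
--             cur = (i, 1) if cur is None else (cur[0], cur[1] + 1)
--         else:
--             if cur is not None:
--                 runs.append(cur)
--             cur = None
--     if cur is not None:
--         runs.append(cur)
--     # pick the longest run, ties broken in favour of the later run
--     best = None
--     for r in runs:
--         if best is None or best[1] <= r[1]:
--             best = r
--     if best is None: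
--         return [lst[0]]
--     s, L = best
--     return lst[s:s + L]
-- ===== Notes on version B (the rewrite author's own statement) =====
-- stated objective: alternative
-- what changed: B replaces A's fused one-pass scan with mutable (length, lenmax, ind) counters by a three-stage pipeline: build the boolean mask, collect the maximal True runs as (start, length) pairs, then select the longest run (ties to the later run) and slice it out.
import Mathlib
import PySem

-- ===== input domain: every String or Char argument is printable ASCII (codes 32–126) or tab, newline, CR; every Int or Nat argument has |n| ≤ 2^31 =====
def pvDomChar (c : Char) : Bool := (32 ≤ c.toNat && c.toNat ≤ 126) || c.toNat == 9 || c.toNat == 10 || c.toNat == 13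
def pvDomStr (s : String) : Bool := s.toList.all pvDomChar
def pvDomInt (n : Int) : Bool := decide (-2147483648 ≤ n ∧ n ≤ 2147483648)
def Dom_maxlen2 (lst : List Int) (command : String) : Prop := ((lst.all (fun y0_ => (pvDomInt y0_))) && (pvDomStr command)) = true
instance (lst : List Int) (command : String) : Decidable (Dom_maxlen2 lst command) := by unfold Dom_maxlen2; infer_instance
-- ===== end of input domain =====

-- B re-implements maxlen2 as a mask → maximal-runs → select-longest pipeline instead of
-- A's fused scan with (length, lenmax, ind) counters; same results, no speed claim.

-- ===== PORT A =====
-- shared module helpers (identical source text in Source A and Source B)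

-- while i * i <= a: ... i += 2   (fuel = a.toNat is enough: the loop runs while i ≤ a)
def isPrimeLoop (a : Int) : Nat → Int → Bool
  | 0, _ => true
  | fuel + 1, i =>
    if i * i ≤ a then
      (if PySem.Int.mod a i = 0 then false else isPrimeLoop a fuel (i + 2))
    else true

def isPrime (a : Int) : Bool :=
  if a = 2 || a = 3 then true
  else if a < 2 || PySem.Int.mod a 2 = 0 || PySem.Int.mod a 3 = 0 then false
  else isPrimeLoop a a.toNat 3

-- verify_prop2 returns None (falsy) for other commands; both callers use it as a boolean
def verifyProp2 (a : Int) (command : String) : Bool :=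
  if command = "4" then isPrime a
  else if command = "8" then decide (0 ≤ a ∧ a ≤ 10)
  else false

def maxlen2 (lst : List Int) (command : String) : List Int :=
  let st := (PySem.List.pyRange 0 lst.length 1).foldl
    (fun (st : Int × Int × Int) i =>
      let length := if verifyProp2 (PySem.List.pyGetD lst i 0) command then st.1 + 1 else 0
      if st.2.1 ≤ length then (length, length, i + 1) else (length, st.2.1, st.2.2))
    (0, 0, -1)
  if st.2.1 = 0 then
    match PySem.List.pyGet? lst 0 with   -- lst[0]: IndexError on [] (excluded by Pre_)
    | some v => [v]
    | none => []
  else PySem.List.slice lst (some (st.2.2 - st.2.1)) (some st.2.2)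

-- ===== PORT B =====
-- for i, m in enumerate(mask): grow/flush the current run; flush once more at the end
def collectRuns : List Bool → Int → List (Int × Int) → Option (Int × Int) → List (Int × Int)
  | [], _, runs, cur => match cur with | none => runs | some c => runs ++ [c]
  | m :: t, i, runs, cur =>
    if m then
      collectRuns t (i + 1) runs
        (some (match cur with | none => (i, 1) | some (s, l) => (s, l + 1)))
    else
      collectRuns t (i + 1) (match cur with | none => runs | some c => runs ++ [c]) none

-- for r in runs: if best is None or best[1] <= r[1]: best = r
def bestRun (runs : List (Int × Int)) : Option (Int × Int) :=
  runs.foldl (fun b r => match b with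
    | none => some r
    | some q => if q.2 ≤ r.2 then some r else some q) none

def maxlen2_alt (lst : List Int) (command : String) : List Int :=
  let mask := lst.map (fun x => verifyProp2 x command)
  let runs := collectRuns mask 0 [] none
  match bestRun runs with
  | none =>
    match PySem.List.pyGet? lst 0 with   -- lst[0]: IndexError on [] (excluded by Pre_)
    | some v => [v]
    | none => []
  | some (s, L) => PySem.List.slice lst (some s) (some (s + L))

-- ===== PRECONDITION & SPEC =====
-- Pre_ excludes only the empty list, on which the Python A raises IndexError (lst[0]).
def Pre_maxlen2 (lst : List Int) (command : String) : Prop := lst ≠ []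
instance (lst : List Int) (command : String) : Decidable (Pre_maxlen2 lst command) := by
  unfold Pre_maxlen2; infer_instance

def pvWitness_maxlen2 : List Int × String := ([4, 5, 7, 8, 11], "4")

def Spec_maxlen2 (lst : List Int) (command : String) (out : List Int) : Prop := out = maxlen2_alt lst command
instance (lst : List Int) (command : String) (out : List Int) : Decidable (Spec_maxlen2 lst command out) := by unfold Spec_maxlen2; infer_instance

-- ===== CLAIM (what is proved, stated in full; the proofs are below) =====
def Claim_equal_maxlen2 : Prop := ∀ (lst : List Int) (command : String), Dom_maxlen2 lst command → Pre_maxlen2 lst command → Spec_maxlen2 lst command (maxlen2 lst command)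

-- ===== LEMMAS AND PROOFS =====

-- A's loop, restated as structural recursion over the mask with absolute index k
def recA : List Bool → Int → Int × Int × Int → Int × Int × Int
  | [], _, st => st
  | m :: t, k, st =>
    let len := if m then st.1 + 1 else 0
    recA t (k + 1) (if st.2.1 ≤ len then (len, len, k + 1) else (len, st.2.1, st.2.2))

def curLen : Option (Int × Int) → Int
  | none => 0
  | some q => q.2

def maxLenR (rs : List (Int × Int)) : Int := rs.foldl (fun m r => max m r.2) 0

-- invariant linking A's (length, lenmax, ind) to B's (runs, cur) after the prefix < k
def LoopInv (k len mx ind : Int) (runs : List (Int × Int)) (cur : Option (Int × Int)) : Prop :=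
  len = curLen cur ∧
  (∀ s l, cur = some (s, l) → s + l = k ∧ 1 ≤ l) ∧
  mx = max (maxLenR runs) (curLen cur) ∧
  (runs = [] ∨ ∃ sB, bestRun runs = some (sB, maxLenR runs) ∧ 1 ≤ maxLenR runs ∧
      (curLen cur < maxLenR runs → ind = sB + maxLenR runs)) ∧
  (∀ s l, cur = some (s, l) → maxLenR runs ≤ l → ind = s + l)

lemma maxLenR_append (rs : List (Int × Int)) (r : Int × Int) :
    maxLenR (rs ++ [r]) = max (maxLenR rs) r.2 := by
  simp [maxLenR, List.foldl_append]

lemma bestRun_append (rs : List (Int × Int)) (r : Int × Int) :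
    bestRun (rs ++ [r]) = match bestRun rs with
      | none => some r
      | some q => if q.2 ≤ r.2 then some r else some q := by
  simp [bestRun, List.foldl_append]

lemma bestRun_nil : bestRun [] = none := rfl

-- final-state relation extracted from the invariant
def Post (st : Int × Int × Int) (F : List (Int × Int)) : Prop :=
  (st.2.1 = 0 → bestRun F = none) ∧
  (st.2.1 ≠ 0 → ∃ s, bestRun F = some (s, st.2.1) ∧ st.2.2 = s + st.2.1)

lemma inv_post (k len mx ind : Int) (runs : List (Int × Int)) (cur : Option (Int × Int))
    (h : LoopInv k len mx ind runs cur) :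
    Post (len, mx, ind) (match cur with | none => runs | some c => runs ++ [c]) := by
  obtain ⟨h1, h2, h3, h4, h5⟩ := h
  cases cur with
  | none =>
    show (mx = 0 → bestRun runs = none) ∧
      (mx ≠ 0 → ∃ s, bestRun runs = some (s, mx) ∧ ind = s + mx)
    simp only [curLen] at h3
    constructor
    · intro hmx
      rcases h4 with hnil | ⟨sB, hb, hge, hind⟩
      · subst hnil; exact bestRun_nil
      · omega
    · intro hmx
      rcases h4 with hnil | ⟨sB, hb, hge, hind⟩
      · subst hnil; rw [show maxLenR [] = 0 from rfl] at h3; omega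
      · simp only [curLen] at hind
        refine ⟨sB, ?_, ?_⟩
        · have hmxe : mx = maxLenR runs := by omega
          rw [hmxe]; exact hb
        · have := hind (by omega); omega
  | some c =>
    obtain ⟨s, l⟩ := c
    obtain ⟨hk, hl⟩ := h2 s l rfl
    show (mx = 0 → bestRun (runs ++ [(s, l)]) = none) ∧
      (mx ≠ 0 → ∃ s', bestRun (runs ++ [(s, l)]) = some (s', mx) ∧ ind = s' + mx)
    simp only [curLen] at h3
    have h5' := h5 s l rfl
    constructor
    · intro hmx
      exfalso; omega
    · intro hmx
      by_cases hc : maxLenR runs ≤ l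
      · refine ⟨s, ?_, ?_⟩
        · rw [bestRun_append]
          rcases h4 with hnil | ⟨sB, hb, hge, hind⟩
          · subst hnil; rw [bestRun_nil]
            have hmxe : mx = l := by rw [show maxLenR [] = 0 from rfl] at h3; omega
            rw [hmxe]
          · rw [hb]
            simp only [if_pos hc]
            have hmxe : mx = l := by omega
            rw [hmxe]
        · have := h5' hc; omega
      · rcases h4 with hnil | ⟨sB, hb, hge, hind⟩
        · exfalso; rw [hnil, show maxLenR [] = 0 from rfl] at hc; omega
        · simp only [curLen] at hind
          refine ⟨sB, ?_, ?_⟩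
          · rw [bestRun_append, hb]
            simp only [if_neg hc]
            have hmxe : mx = maxLenR runs := by omega
            rw [hmxe]
          · have := hind (by omega); omega

lemma main_inv (t : List Bool) :
    ∀ (k len mx ind : Int) (runs : List (Int × Int)) (cur : Option (Int × Int)),
      LoopInv k len mx ind runs cur →
      Post (recA t k (len, mx, ind)) (collectRuns t k runs cur) := by
  induction t with
  | nil =>
    intro k len mx ind runs cur h
    have h' := inv_post k len mx ind runs cur h
    cases cur with
    | none => simpa [recA, collectRuns] using h'
    | some c => simpa [recA, collectRuns] using h'
  | cons m t ih =>
    intro k len mx ind runs cur h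
    obtain ⟨h1, h2, h3, h4, h5⟩ := h
    cases m with
    | true =>
      cases cur with
      | none =>
        have hlen : len = 0 := by simpa [curLen] using h1
        subst hlen
        simp only [curLen] at h3
        simp [recA, collectRuns]
        split_ifs with hcond
        · -- hcond : mx ≤ 1
          apply ih
          refine ⟨rfl, ?_, ?_, ?_, ?_⟩
          · intro s l hc
            injection hc with hc; injection hc with hc1 hc2
            constructor <;> omega
          · simp only [curLen]; omega
          · rcases h4 with hnil | ⟨sB, hb, hge, hind⟩
            · exact Or.inl hnil
            · refine Or.inr ⟨sB, hb, hge, ?_⟩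
              intro hlt; simp only [curLen] at hlt; omega
          · intro s l hc
            injection hc with hc; injection hc with hc1 hc2
            subst hc1; subst hc2
            intro _; omega
        · apply ih
          refine ⟨rfl, ?_, ?_, ?_, ?_⟩
          · intro s l hc
            injection hc with hc; injection hc with hc1 hc2
            constructor <;> omega
          · simp only [curLen]; omega
          · rcases h4 with hnil | ⟨sB, hb, hge, hind⟩
            · exfalso; rw [hnil, show maxLenR [] = 0 from rfl] at h3; omega
            · simp only [curLen] at hind
              refine Or.inr ⟨sB, hb, hge, ?_⟩
              intro hlt; simp only [curLen] at hlt
              exact hind (by omega)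
          · intro s l hc
            injection hc with hc; injection hc with hc1 hc2
            subst hc1; subst hc2
            intro hle
            rcases h4 with hnil | ⟨sB, hb, hge, hind⟩
            · exfalso; rw [hnil, show maxLenR [] = 0 from rfl] at h3; omega
            · omega
      | some c =>
        obtain ⟨s0, l0⟩ := c
        obtain ⟨hk0, hl0⟩ := h2 s0 l0 rfl
        have hlen : l0 = len := by simpa [curLen] using h1.symm
        subst hlen
        simp only [curLen] at h3
        have h5' := h5 s0 l0 rfl
        simp [recA, collectRuns]
        split_ifs with hcond
        · -- hcond : mx ≤ l0 + 1
          apply ih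
          refine ⟨rfl, ?_, ?_, ?_, ?_⟩
          · intro s l hc
            injection hc with hc; injection hc with hc1 hc2
            constructor <;> omega
          · simp only [curLen]; omega
          · rcases h4 with hnil | ⟨sB, hb, hge, hind⟩
            · exact Or.inl hnil
            · refine Or.inr ⟨sB, hb, hge, ?_⟩
              intro hlt; simp only [curLen] at hlt; omega
          · intro s l hc
            injection hc with hc; injection hc with hc1 hc2
            subst hc1; subst hc2
            intro _; omega
        · apply ih
          refine ⟨rfl, ?_, ?_, ?_, ?_⟩
          · intro s l hc
            injection hc with hc; injection hc with hc1 hc2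
            constructor <;> omega
          · simp only [curLen]; omega
          · rcases h4 with hnil | ⟨sB, hb, hge, hind⟩
            · exfalso; rw [hnil, show maxLenR [] = 0 from rfl] at h3; omega
            · simp only [curLen] at hind
              refine Or.inr ⟨sB, hb, hge, ?_⟩
              intro hlt; simp only [curLen] at hlt
              exact hind (by omega)
          · intro s l hc
            injection hc with hc; injection hc with hc1 hc2
            subst hc1; subst hc2
            intro hle
            rcases h4 with hnil | ⟨sB, hb, hge, hind⟩
            · exfalso
              rw [hnil] at h3
              simp only [curLen, maxLenR, List.foldl_nil] at h3
              omega
            · omega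
    | false =>
      cases cur with
      | none =>
        have hlen : len = 0 := by simpa [curLen] using h1
        subst hlen
        simp only [curLen] at h3
        simp [recA, collectRuns]
        split_ifs with hcond
        · -- hcond : mx ≤ 0
          apply ih
          rcases h4 with hnil | ⟨sB, hb, hge, hind⟩
          · subst hnil
            refine ⟨rfl, ?_, ?_, Or.inl rfl, ?_⟩
            · intro s l hc; cases hc
            · simp [curLen, maxLenR]
            · intro s l hc; cases hc
          · exfalso; omega
        · apply ih
          refine ⟨rfl, ?_, ?_, ?_, ?_⟩
          · intro s l hc; cases hc
          · simp only [curLen]; omega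
          · rcases h4 with hnil | ⟨sB, hb, hge, hind⟩
            · exfalso; rw [hnil, show maxLenR [] = 0 from rfl] at h3; omega
            · exact Or.inr ⟨sB, hb, hge, hind⟩
          · intro s l hc; cases hc
      | some c =>
        obtain ⟨s0, l0⟩ := c
        obtain ⟨hk0, hl0⟩ := h2 s0 l0 rfl
        have hlen : l0 = len := by simpa [curLen] using h1.symm
        subst hlen
        simp only [curLen] at h3
        have h5' := h5 s0 l0 rfl
        simp [recA, collectRuns]
        split_ifs with hcond
        · exfalso; omega
        · apply ih
          refine ⟨rfl, ?_, ?_, ?_, ?_⟩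
          · intro s l hc; cases hc
          · simp only [curLen]
            rw [maxLenR_append]
            omega
          · refine Or.inr ?_
            rw [maxLenR_append, bestRun_append]
            by_cases hc : maxLenR runs ≤ l0
            · rcases h4 with hnil | ⟨sB, hb, hge, hind⟩
              · subst hnil
                rw [bestRun_nil]
                refine ⟨s0, ?_, ?_, ?_⟩
                · rw [show max (maxLenR ([] : List (Int × Int))) l0 = l0 from by
                    rw [show maxLenR ([] : List (Int × Int)) = 0 from rfl]; omega]
                · rw [show maxLenR ([] : List (Int × Int)) = 0 from rfl]; omega
                · intro _
                  have := h5' (by rw [show maxLenR ([] : List (Int × Int)) = 0 from rfl]; omega)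
                  rw [show max (maxLenR ([] : List (Int × Int))) l0 = l0 from by
                    rw [show maxLenR ([] : List (Int × Int)) = 0 from rfl]; omega]
                  omega
              · rw [hb]
                refine ⟨s0, ?_, ?_, ?_⟩
                · simp only [if_pos hc]
                  rw [show max (maxLenR runs) l0 = l0 from by omega]
                · omega
                · intro _
                  have := h5' hc
                  rw [show max (maxLenR runs) l0 = l0 from by omega]
                  omega
            · rcases h4 with hnil | ⟨sB, hb, hge, hind⟩
              · exfalso; rw [hnil, show maxLenR [] = 0 from rfl] at hc; omega
              · simp only [curLen] at hind
                rw [hb]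
                refine ⟨sB, ?_, ?_, ?_⟩
                · simp only [if_neg hc]
                  rw [show max (maxLenR runs) l0 = maxLenR runs from by omega]
                · omega
                · intro _
                  have := hind (by omega)
                  rw [show max (maxLenR runs) l0 = maxLenR runs from by omega]
                  omega
          · intro s l hc; cases hc

-- bridge: A's foldl over range(len(lst)) with lst[i] equals recA over the mask
lemma bridgeA (command : String) :
    ∀ (t pre : List Int) (st : Int × Int × Int),
      (PySem.List.pyRange (pre.length : Int) ((pre.length : Int) + (t.length : Int)) 1).foldl
        (fun (st : Int × Int × Int) i =>
          let length := if verifyProp2 (PySem.List.pyGetD (pre ++ t) i 0) command then st.1 + 1 else 0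
          if st.2.1 ≤ length then (length, length, i + 1) else (length, st.2.1, st.2.2)) st
      = recA (t.map (fun x => verifyProp2 x command)) (pre.length : Int) st := by
  intro t
  induction t with
  | nil =>
    intro pre st
    rw [PySem.List.pyRange_one_eq_nil (by simp)]
    simp [recA]
  | cons x t ih =>
    intro pre st
    rw [show (((x :: t).length : Nat) : Int) = (t.length : Int) + 1 from by
      push_cast [List.length_cons]; ring]
    rw [show ((pre.length : Int) + ((t.length : Int) + 1)) = ((pre.length : Int) + 1) + (t.length : Int) from by ring]
    rw [PySem.List.pyRange_one_cons (by omega)]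
    simp only [List.foldl_cons]
    have hget : PySem.List.pyGetD (pre ++ x :: t) ((pre.length : Nat) : Int) 0 = x := by
      rw [PySem.List.pyGetD_natCast]
      simp [List.getD]
    simp only [hget]
    simp only [List.map_cons, recA]
    have key := fun st => ih (pre ++ [x]) st
    simp only [List.append_assoc, List.singleton_append, List.length_append,
      List.length_cons, List.length_nil] at key
    push_cast at key
    exact key _

-- ===== VERDICT (by name: the statement is the Claim_ definition above) =====
theorem maxlen2_spec : Claim_equal_maxlen2 := by
  intro lst command _ _
  have hb := bridgeA command lst [] (0, 0, -1)
  simp only [List.length_nil, List.nil_append, Nat.cast_zero, Nat.zero_add, zero_add] at hb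
  have hpost := main_inv (lst.map (fun x => verifyProp2 x command)) 0 0 0 (-1) [] none
    ⟨rfl, by simp, by simp [curLen, maxLenR], Or.inl rfl, by simp⟩
  unfold Post at hpost
  obtain ⟨hzero, hpos⟩ := hpost
  have goalA : maxlen2 lst command =
      (if (recA (lst.map (fun x => verifyProp2 x command)) 0 (0, 0, -1)).2.1 = 0 then
        (match PySem.List.pyGet? lst 0 with | some v => [v] | none => [])
      else PySem.List.slice lst
        (some ((recA (lst.map (fun x => verifyProp2 x command)) 0 (0, 0, -1)).2.2
          - (recA (lst.map (fun x => verifyProp2 x command)) 0 (0, 0, -1)).2.1))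
        (some ((recA (lst.map (fun x => verifyProp2 x command)) 0 (0, 0, -1)).2.2))) := by
    rw [← hb]; rfl
  have goalB : maxlen2_alt lst command =
      (match bestRun (collectRuns (lst.map (fun x => verifyProp2 x command)) 0 [] none) with
      | none => (match PySem.List.pyGet? lst 0 with | some v => [v] | none => [])
      | some (s, L) => PySem.List.slice lst (some s) (some (s + L))) := rfl
  unfold Spec_maxlen2
  rw [goalA, goalB]
  set st := recA (lst.map (fun x => verifyProp2 x command)) 0 (0, 0, -1) with hst
  by_cases hmx : st.2.1 = 0
  · rw [if_pos hmx, hzero hmx]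
  · obtain ⟨s, hbest, hind⟩ := hpos hmx
    rw [if_neg hmx, hbest]
    have h1 : st.2.2 - st.2.1 = s := by omega
    rw [h1, hind]
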